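-- pv_equiv track=rewrite | github.com/Diego-Cintron/Dungeons-And-Dragon-Python- | D&D.py | set_modifiers
-- ===== SOURCE A (Python) =====
-- def set_modifiers(stats):
--     modifiers = [0, 0, 0, 0, 0, 0]
--     stat_index = -1
--     for stat in stats:
--         stat_index += 1
--         if stat == 0 or stat == 1:
--             modifiers[stat_index] = -5
--         elif stat == 2 or stat == 3:
--             modifiers[stat_index] = -4
--         elif stat == 4 or stat == 5:
--             modifiers[stat_index] = -3
--         elif stat == 6 or stat == 7:
--             modifiers[stat_index] = -2
--         elif stat == 8 or stat == 9:
--             modifiers[stat_index] = -1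
--         elif stat == 10 or stat == 11:
--             modifiers[stat_index] = 0
--         elif stat == 12 or stat == 13:
--             modifiers[stat_index] = 1
--         elif stat == 14 or stat == 15:
--             modifiers[stat_index] = 2
--         elif stat == 16 or stat == 17:
--             modifiers[stat_index] = 3
--         elif stat == 18 or stat == 19:
--             modifiers[stat_index] = 4
--         elif stat == 20 or stat == 21:
--             modifiers[stat_index] = 5
--         elif stat == 22 or stat == 23:
--             modifiers[stat_index] = 6
--         elif stat == 24 or stat == 25:
--             modifiers[stat_index] = 7
--         elif stat == 26 or stat == 27:
--             modifiers[stat_index] = 8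
--         elif stat == 28 or stat == 29:
--             modifiers[stat_index] = 9
--         else:
--             modifiers[stat_index] = 10
--     return modifiers
-- ===== SOURCE B (Python) =====
-- def set_modifiers(stats):
--     # closed-form modifier: (stat-10)//2 for 0..29, capped else-branch value 10 otherwise
--     mods = [(s - 10) // 2 if 0 <= s <= 29 else 10 for s in stats]
--     return (mods + [0] * 6)[:6]
-- ===== Notes on version B (the rewrite author's own statement) =====
-- stated objective: simpler
-- what changed: The 16-branch if-elif ladder and the in-place writes into a fixed 6-slot list are replaced by a closed-form arithmetic formula (stat-10)//2 applied per element, padded/truncated to 6 entries.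
import Mathlib
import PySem

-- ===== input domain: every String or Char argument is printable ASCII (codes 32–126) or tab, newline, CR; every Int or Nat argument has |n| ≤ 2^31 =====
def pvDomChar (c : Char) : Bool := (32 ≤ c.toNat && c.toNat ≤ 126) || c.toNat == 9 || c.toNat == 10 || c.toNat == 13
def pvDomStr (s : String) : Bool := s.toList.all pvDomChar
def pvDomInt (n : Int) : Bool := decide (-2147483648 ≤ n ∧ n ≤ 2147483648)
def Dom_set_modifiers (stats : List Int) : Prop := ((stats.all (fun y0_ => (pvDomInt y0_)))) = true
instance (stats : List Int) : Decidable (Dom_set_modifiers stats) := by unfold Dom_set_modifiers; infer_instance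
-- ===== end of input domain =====

-- B replaces A's 16-branch if-elif ladder and in-place writes into a fixed 6-slot list
-- by a closed-form per-element formula (stat-10)//2, padded/truncated to 6 entries (objective: simpler).

-- ===== PORT A =====
-- the body of A's loop: increment stat_index, assign the ladder value at that slot
def set_modifiers_step (st : List Int × Int) (stat : Int) : List Int × Int :=
  let idx := st.2 + 1
  let m := st.1
  (if stat = 0 ∨ stat = 1 then m.set idx.toNat (-5)
   else if stat = 2 ∨ stat = 3 then m.set idx.toNat (-4)
   else if stat = 4 ∨ stat = 5 then m.set idx.toNat (-3)
   else if stat = 6 ∨ stat = 7 then m.set idx.toNat (-2)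
   else if stat = 8 ∨ stat = 9 then m.set idx.toNat (-1)
   else if stat = 10 ∨ stat = 11 then m.set idx.toNat 0
   else if stat = 12 ∨ stat = 13 then m.set idx.toNat 1
   else if stat = 14 ∨ stat = 15 then m.set idx.toNat 2
   else if stat = 16 ∨ stat = 17 then m.set idx.toNat 3
   else if stat = 18 ∨ stat = 19 then m.set idx.toNat 4
   else if stat = 20 ∨ stat = 21 then m.set idx.toNat 5
   else if stat = 22 ∨ stat = 23 then m.set idx.toNat 6
   else if stat = 24 ∨ stat = 25 then m.set idx.toNat 7
   else if stat = 26 ∨ stat = 27 then m.set idx.toNat 8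
   else if stat = 28 ∨ stat = 29 then m.set idx.toNat 9
   else m.set idx.toNat 10, idx)

def set_modifiers (stats : List Int) : List Int :=
  (stats.foldl set_modifiers_step ([0, 0, 0, 0, 0, 0], -1)).1

-- ===== PORT B =====
def set_modifiers_alt (stats : List Int) : List Int :=
  ((stats.map (fun s => if 0 ≤ s ∧ s ≤ 29 then PySem.Int.floordiv (s - 10) 2 else 10))
    ++ [0, 0, 0, 0, 0, 0]).take 6

-- ===== PRECONDITION & SPEC =====
-- A writes into a fixed 6-slot list: with more than 6 stats it raises IndexError, so those inputs are excluded.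
def Pre_set_modifiers (stats : List Int) : Prop := stats.length ≤ 6
instance (stats : List Int) : Decidable (Pre_set_modifiers stats) := by unfold Pre_set_modifiers; infer_instance
def pvWitness_set_modifiers : List Int := [8, 14, 13, 10, 12, 15]

def Spec_set_modifiers (stats : List Int) (out : List Int) : Prop := out = set_modifiers_alt stats
instance (stats : List Int) (out : List Int) : Decidable (Spec_set_modifiers stats out) := by unfold Spec_set_modifiers; infer_instance

-- ===== CLAIM (what is proved, stated in full; the proofs are below) =====
def Claim_equal_set_modifiers : Prop := ∀ (stats : List Int), Dom_set_modifiers stats → Pre_set_modifiers stats → Spec_set_modifiers stats (set_modifiers stats)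

-- ===== LEMMAS AND PROOFS =====

-- B's per-element closed form
def pvModB (s : Int) : Int := if 0 ≤ s ∧ s ≤ 29 then PySem.Int.floordiv (s - 10) 2 else 10

-- A's ladder assignment is exactly a set of B's closed-form value at the next index
set_option maxHeartbeats 1600000 in
theorem pvStep_eq (m : List Int) (i : Int) (s : Int) :
    set_modifiers_step (m, i) s = (m.set (i + 1).toNat (pvModB s), i + 1) := by
  by_cases h : 0 ≤ s ∧ s ≤ 29
  · obtain ⟨hlo, hhi⟩ := h
    interval_cases s <;> norm_num [set_modifiers_step, pvModB, PySem.Int.floordiv] <;> try rfl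
  · have n1 : ¬(s = 0 ∨ s = 1) := by omega
    have n2 : ¬(s = 2 ∨ s = 3) := by omega
    have n3 : ¬(s = 4 ∨ s = 5) := by omega
    have n4 : ¬(s = 6 ∨ s = 7) := by omega
    have n5 : ¬(s = 8 ∨ s = 9) := by omega
    have n6 : ¬(s = 10 ∨ s = 11) := by omega
    have n7 : ¬(s = 12 ∨ s = 13) := by omega
    have n8 : ¬(s = 14 ∨ s = 15) := by omega
    have n9 : ¬(s = 16 ∨ s = 17) := by omega
    have n10 : ¬(s = 18 ∨ s = 19) := by omega
    have n11 : ¬(s = 20 ∨ s = 21) := by omega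
    have n12 : ¬(s = 22 ∨ s = 23) := by omega
    have n13 : ¬(s = 24 ∨ s = 25) := by omega
    have n14 : ¬(s = 26 ∨ s = 27) := by omega
    have n15 : ¬(s = 28 ∨ s = 29) := by omega
    simp only [set_modifiers_step, pvModB, if_neg h, if_neg n1, if_neg n2, if_neg n3, if_neg n4,
      if_neg n5, if_neg n6, if_neg n7, if_neg n8, if_neg n9, if_neg n10, if_neg n11, if_neg n12,
      if_neg n13, if_neg n14, if_neg n15]

-- A's whole fold, seen as successive sets of pvModB values
def applySets (m : List Int) (i : Int) : List Int → List Int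
  | [] => m
  | s :: t => applySets (m.set (i + 1).toNat (pvModB s)) (i + 1) t

theorem foldl_step_eq (l : List Int) : ∀ (m : List Int) (i : Int),
    (l.foldl set_modifiers_step (m, i)).1 = applySets m i l := by
  induction l with
  | nil => intro m i; rfl
  | cons s t ih => intro m i; rw [List.foldl_cons, pvStep_eq, applySets, ih]

theorem set_modifiers_eq_alt (stats : List Int) (h : stats.length ≤ 6) :
    set_modifiers stats = set_modifiers_alt stats := by
  match stats, h with
  | [], _ => rfl
  | [a], _ =>
      rw [set_modifiers, foldl_step_eq]; norm_num [applySets, set_modifiers_alt, List.set, pvModB]; try rfl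
  | [a, b], _ =>
      rw [set_modifiers, foldl_step_eq]; norm_num [applySets, set_modifiers_alt, List.set, pvModB]; try rfl
  | [a, b, c], _ =>
      rw [set_modifiers, foldl_step_eq]; norm_num [applySets, set_modifiers_alt, List.set, pvModB]; try rfl
  | [a, b, c, d], _ =>
      rw [set_modifiers, foldl_step_eq]; norm_num [applySets, set_modifiers_alt, List.set, pvModB]; try rfl
  | [a, b, c, d, e], _ =>
      rw [set_modifiers, foldl_step_eq]; norm_num [applySets, set_modifiers_alt, List.set, pvModB]; try rfl
  | [a, b, c, d, e, f], _ =>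
      rw [set_modifiers, foldl_step_eq]; norm_num [applySets, set_modifiers_alt, List.set, pvModB]; try rfl
  | a :: b :: c :: d :: e :: f :: g :: t, h => simp only [List.length_cons] at h; omega

-- ===== VERDICT (by name: the statement is the Claim_ definition above) =====
theorem set_modifiers_spec : Claim_equal_set_modifiers := by
  intro stats _ hpre
  exact set_modifiers_eq_alt stats hpre
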